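-- pv_equiv track=rewrite | github.com/EugeneL97/AdventOfCode | 2024/Day-07/part2.py | can_reach_target_sum
-- ===== SOURCE A (Python) =====
-- def can_reach_target_sum(target, numbers):
--     dp = {numbers[0]}
--
--     for i in range(1, len(numbers)):
--         next_set = set()
--
--         for num in dp:
--             for result in (
--                 num + numbers[i],
--                 num * numbers[i],
--                 num * (10 ** len(str(numbers[i]))) + numbers[i]
--             ):
--                 if result <= target:
--                     next_set.add(result)
--
--         dp = next_set
--
--     return target if target in dp else 0
-- ===== SOURCE B (Python) =====
-- def can_reach_target_sum(target, numbers):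
--     # Top-down memoized search over (value, position) states with short-circuit,
--     # instead of rebuilding a full frontier set per position.
--     memo = {}
--
--     def go(v, i):
--         if i == len(numbers):
--             return v == target
--         key = (v, i)
--         if key in memo:
--             return memo[key]
--         m = numbers[i]
--         shift = 10 ** len(str(m))
--         found = False
--         for r in (v + m, v * m, v * shift + m):
--             if r <= target and go(r, i + 1):
--                 found = True
--                 break
--         memo[key] = found
--         return found
--
--     return target if go(numbers[0], 1) else 0
-- ===== Notes on version B (the rewrite author's own statement) =====
-- stated objective: alternative
-- what changed: Replaces A's level-by-level forward frontier-set DP with a top-down memoized depth-first search over (value, position) states that short-circuits as soon as the target is proved reachable.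
import Mathlib
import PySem

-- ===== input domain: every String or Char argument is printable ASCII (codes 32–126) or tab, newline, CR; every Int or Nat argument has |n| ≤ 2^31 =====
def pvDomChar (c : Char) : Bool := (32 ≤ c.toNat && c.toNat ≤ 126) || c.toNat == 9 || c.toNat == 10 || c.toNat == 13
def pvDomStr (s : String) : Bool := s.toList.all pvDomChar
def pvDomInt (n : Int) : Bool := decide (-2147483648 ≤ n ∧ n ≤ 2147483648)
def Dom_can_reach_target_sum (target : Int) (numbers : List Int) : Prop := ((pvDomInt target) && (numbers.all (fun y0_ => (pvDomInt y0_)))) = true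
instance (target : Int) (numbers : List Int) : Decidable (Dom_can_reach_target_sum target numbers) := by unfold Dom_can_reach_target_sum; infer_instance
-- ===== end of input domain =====

-- B replaces A's level-by-level frontier-set DP by a memoized top-down search over
-- (value, position) states that short-circuits on the first witness chain (objective:
-- alternative; same worst-case state count, no speed claim).

-- ===== PORT A =====
-- body of A's outer loop: build next_set from dp and numbers[i]
-- body of A's inner loop: add the three pruned results for one frontier value num
def innerA (target m : Int) (ns : PySem.Set Int) (num : Int) : PySem.Set Int :=
  [num + m, num * m, num * (10 : Int) ^ (PySem.Int.toStr m).length + m].foldl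
    (fun ns r => if r ≤ target then PySem.Set.add ns r else ns) ns

def stepA (target : Int) (dp : PySem.Set Int) (m : Int) : PySem.Set Int :=
  dp.foldl (innerA target m) PySem.Set.empty

def can_reach_target_sum (target : Int) (numbers : List Int) : Int :=
  -- numbers[0]: Python raises IndexError on []; that input is excluded by Pre_
  if PySem.Set.contains
      ((PySem.List.pyRange 1 (numbers.length : Int) 1).foldl
        (fun dp i => stepA target dp (PySem.List.pyGetD numbers i 0))
        (PySem.Set.ofList [PySem.List.pyGetD numbers 0 0]))
      target
  then target else 0

-- ===== PORT B =====
-- memoized recursive search go(v, i) of Source B: the remaining suffix numbers[i:] is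
-- passed structurally, the memo key stays (v, i) as in the Python
mutual
def goB (target : Int) : List Int → Int → Int → PySem.Dict (Int × Int) Bool →
    Bool × PySem.Dict (Int × Int) Bool
  | [], _, v, memo => (v == target, memo)
  | m :: rest, i, v, memo =>
    match PySem.Dict.get? memo (v, i) with
    | some b => (b, memo)
    | none =>
      match tryCands target rest i
          [v + m, v * m, v * (10 : Int) ^ (PySem.Int.toStr m).length + m] memo with
      | (found, memo') => (found, PySem.Dict.insert memo' (v, i) found)
termination_by rest _ _ _ => (rest.length, 0)

-- the 'for r in (…): if r <= target and go(r, i+1): found = True; break' loop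
def tryCands (target : Int) (rest : List Int) (i : Int) :
    List Int → PySem.Dict (Int × Int) Bool → Bool × PySem.Dict (Int × Int) Bool
  | [], memo => (false, memo)
  | r :: rs, memo =>
    if r ≤ target then
      match goB target rest (i + 1) r memo with
      | (true, memo') => (true, memo')
      | (false, memo') => tryCands target rest i rs memo'
    else tryCands target rest i rs memo
termination_by cands _ => (rest.length, cands.length + 1)
end

def can_reach_target_sum_alt (target : Int) (numbers : List Int) : Int :=
  match numbers with
  | [] => 0   -- Python raises IndexError here (numbers[0]); excluded by Pre_
  | n0 :: rest => if (goB target rest 1 n0 PySem.Dict.empty).1 then target else 0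

-- ===== PRECONDITION & SPEC =====
-- Pre_ excludes only the empty list, on which both Pythons raise IndexError (numbers[0])
def Pre_can_reach_target_sum (target : Int) (numbers : List Int) : Prop := numbers ≠ []
instance (target : Int) (numbers : List Int) : Decidable (Pre_can_reach_target_sum target numbers) := by
  unfold Pre_can_reach_target_sum; infer_instance

def pvWitness_can_reach_target_sum : Int × List Int := (6, [1, 2, 3])

def Spec_can_reach_target_sum (target : Int) (numbers : List Int) (out : Int) : Prop := out = can_reach_target_sum_alt target numbers
instance (target : Int) (numbers : List Int) (out : Int) : Decidable (Spec_can_reach_target_sum target numbers out) := by unfold Spec_can_reach_target_sum; infer_instance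

-- ===== CLAIM (what is proved, stated in full; the proofs are below) =====
def Claim_equal_can_reach_target_sum : Prop := ∀ (target : Int) (numbers : List Int), Dom_can_reach_target_sum target numbers → Pre_can_reach_target_sum target numbers → Spec_can_reach_target_sum target numbers (can_reach_target_sum target numbers)

-- ===== LEMMAS AND PROOFS =====

-- the pure (memo-free) meaning of B's search
def reachP (target v : Int) : List Int → Bool
  | [] => v == target
  | m :: rest =>
    [v + m, v * m, v * (10 : Int) ^ (PySem.Int.toStr m).length + m].any
      (fun r => decide (r ≤ target) && reachP target r rest)

-- memo invariant: every stored entry (v, j) ↦ b means b = reachP target v (suffix at j)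
def MemOk (target : Int) (L : List Int) (memo : PySem.Dict (Int × Int) Bool) : Prop :=
  ∀ (v j : Int) (b : Bool), PySem.Dict.get? memo (v, j) = some b →
    ∃ k : Nat, j = (k : Int) + 1 ∧ b = reachP target v (L.drop k)

lemma tryCands_ok (target : Int) (L : List Int) (rest : List Int) (k : Nat)
    (hgo : ∀ (v : Int) (memo), MemOk target L memo →
      (goB target rest ((k : Int) + 1 + 1) v memo).1 = reachP target v rest ∧
      MemOk target L (goB target rest ((k : Int) + 1 + 1) v memo).2) :
    ∀ (cands : List Int) (memo), MemOk target L memo →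
      (tryCands target rest ((k : Int) + 1) cands memo).1 =
        cands.any (fun r => decide (r ≤ target) && reachP target r rest) ∧
      MemOk target L (tryCands target rest ((k : Int) + 1) cands memo).2 := by
  intro cands
  induction cands with
  | nil => intro memo hm; simp only [tryCands]; exact ⟨rfl, hm⟩
  | cons r rs ih =>
    intro memo hm
    by_cases hr : r ≤ target
    · obtain ⟨h1, h2⟩ := hgo r memo hm
      cases hg : goB target rest ((k : Int) + 1 + 1) r memo with
      | mk b memo' =>
        rw [hg] at h1 h2
        cases b with
        | true =>
          simp only [tryCands, if_pos hr, hg]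
          refine ⟨?_, h2⟩
          simp [hr, ← h1]
        | false =>
          obtain ⟨i1, i2⟩ := ih memo' h2
          simp only [tryCands, if_pos hr, hg]
          refine ⟨?_, i2⟩
          simp [hr, ← h1, i1]
    · obtain ⟨i1, i2⟩ := ih memo hm
      simp only [tryCands, if_neg hr]
      refine ⟨?_, i2⟩
      simp [i1, hr]

lemma goB_ok (target : Int) (L : List Int) :
    ∀ (rest : List Int) (k : Nat), rest = L.drop k →
      ∀ (v : Int) (memo), MemOk target L memo →
        (goB target rest ((k : Int) + 1) v memo).1 = reachP target v rest ∧
        MemOk target L (goB target rest ((k : Int) + 1) v memo).2 := by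
  intro rest
  induction rest with
  | nil => intro k _ v memo hm; simp only [goB]; exact ⟨rfl, hm⟩
  | cons m rest' ih =>
    intro k hk v memo hm
    have hrest' : rest' = L.drop (k + 1) := by
      have := congrArg List.tail hk
      simpa [List.tail_drop] using this
    have hgo : ∀ (w : Int) (memo'), MemOk target L memo' →
        (goB target rest' ((k : Int) + 1 + 1) w memo').1 = reachP target w rest' ∧
        MemOk target L (goB target rest' ((k : Int) + 1 + 1) w memo').2 := by
      intro w memo' hm'
      have hcast : (((k + 1 : Nat)) : Int) + 1 = (k : Int) + 1 + 1 := by push_cast; ring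
      have h := ih (k + 1) hrest' w memo'  hm'
      rw [hcast] at h
      exact h
    cases hget : PySem.Dict.get? memo (v, (k : Int) + 1) with
    | some b =>
      obtain ⟨k2, hk2, hb⟩ := hm v _ b hget
      have hkk : k2 = k := by omega
      subst hkk
      refine ⟨?_, ?_⟩
      · simp only [goB, hget]
        rw [hb, ← hk]
      · simp only [goB, hget]; exact hm
    | none =>
      obtain ⟨t1, t2⟩ := tryCands_ok target L rest' k hgo
        [v + m, v * m, v * (10 : Int) ^ (PySem.Int.toStr m).length + m] memo hm
      cases ht : tryCands target rest' ((k : Int) + 1)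
          [v + m, v * m, v * (10 : Int) ^ (PySem.Int.toStr m).length + m] memo with
      | mk found memo' =>
        rw [ht] at t1 t2
        refine ⟨?_, ?_⟩
        · simp only [goB, hget, ht]
          simpa [reachP] using t1
        · simp only [goB, hget, ht]
          intro w j b hget'
          rw [PySem.Dict.get?_insert] at hget'
          by_cases heq : (w, j) = (v, (k : Int) + 1)
          · rw [if_pos heq] at hget'
            obtain ⟨rfl, rfl⟩ : w = v ∧ j = (k : Int) + 1 := Prod.mk.inj heq
            refine ⟨k, rfl, ?_⟩
            have hb : b = found := (Option.some.inj hget').symm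
            rw [hb, ← hk]
            simp only [reachP]
            exact t1
          · rw [if_neg heq] at hget'
            exact t2 w j b hget'

-- membership after the inner candidate-filter fold of A
lemma mem_candFold (target : Int) :
    ∀ (cl : List Int) (ns : PySem.Set Int) (w : Int),
      w ∈ cl.foldl (fun ns r => if r ≤ target then PySem.Set.add ns r else ns) ns ↔
        w ∈ ns ∨ (w ∈ cl ∧ w ≤ target) := by
  intro cl
  induction cl with
  | nil => simp
  | cons r rs ih =>
    intro ns w
    by_cases hr : r ≤ target
    · simp only [List.foldl_cons, if_pos hr, ih, PySem.Set.mem_add, List.mem_cons]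
      constructor
      · rintro (⟨h | rfl⟩ | ⟨h1, h2⟩)
        · exact Or.inl h
        · exact Or.inr ⟨Or.inl rfl, hr⟩
        · exact Or.inr ⟨Or.inr h1, h2⟩
      · rintro (h | ⟨(rfl | h), hw⟩)
        · exact Or.inl (Or.inl h)
        · exact Or.inl (Or.inr rfl)
        · exact Or.inr ⟨h, hw⟩
    · simp only [List.foldl_cons, if_neg hr, ih, List.mem_cons]
      constructor
      · rintro (h | ⟨h1, h2⟩)
        · exact Or.inl h
        · exact Or.inr ⟨Or.inr h1, h2⟩
      · rintro (h | ⟨(rfl | h), hw⟩)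
        · exact Or.inl h
        · exact absurd hw hr
        · exact Or.inr ⟨h, hw⟩

-- membership in one innerA step
lemma mem_innerA (target m : Int) (ns : PySem.Set Int) (num w : Int) :
    w ∈ innerA target m ns num ↔
      w ∈ ns ∨ (w ∈ [num + m, num * m, num * (10 : Int) ^ (PySem.Int.toStr m).length + m] ∧ w ≤ target) := by
  unfold innerA
  exact mem_candFold target _ ns w

-- membership in A's next_set
lemma mem_stepA (target : Int) (m : Int) :
    ∀ (dp acc : PySem.Set Int) (w : Int),
      w ∈ dp.foldl (innerA target m) acc ↔
        w ∈ acc ∨ ∃ u ∈ dp,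
          w ∈ [u + m, u * m, u * (10 : Int) ^ (PySem.Int.toStr m).length + m] ∧ w ≤ target := by
  intro dp
  induction dp with
  | nil => simp
  | cons v vs ih =>
    intro acc w
    rw [List.foldl_cons, ih, mem_innerA]
    simp only [List.mem_cons]
    constructor
    · rintro ((h | h) | ⟨u, hu, h1, h2⟩)
      · exact Or.inl h
      · exact Or.inr ⟨v, Or.inl rfl, h⟩
      · exact Or.inr ⟨u, Or.inr hu, h1, h2⟩
    · rintro (h | ⟨u, (rfl | hu), h1, h2⟩)
      · exact Or.inl (Or.inl h)
      · exact Or.inl (Or.inr ⟨h1, h2⟩)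
      · exact Or.inr ⟨u, hu, h1, h2⟩

-- A's remaining fold reaches target iff some frontier value reaches it in reachP's sense
lemma foldA_reach (target : Int) :
    ∀ (rest : List Int) (dp : PySem.Set Int),
      target ∈ rest.foldl (stepA target) dp ↔ ∃ v ∈ dp, reachP target v rest = true := by
  intro rest
  induction rest with
  | nil =>
    intro dp
    constructor
    · intro h; exact ⟨target, h, by simp [reachP]⟩
    · rintro ⟨v, hv, hr⟩
      simp only [reachP, beq_iff_eq] at hr
      exact hr ▸ hv
  | cons m rest' ih =>
    intro dp
    simp only [List.foldl_cons, ih]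
    constructor
    · rintro ⟨w, hw, hr⟩
      rw [show stepA target dp m = dp.foldl (innerA target m) PySem.Set.empty from rfl, mem_stepA] at hw
      rcases hw with h | ⟨v, hv, hmem, hle⟩
      · simp [PySem.Set.empty] at h
      · refine ⟨v, hv, ?_⟩
        simp only [reachP, List.any_eq_true]
        exact ⟨w, hmem, by simp [hle, hr]⟩
    · rintro ⟨v, hv, hr⟩
      simp only [reachP, List.any_eq_true] at hr
      obtain ⟨w, hmem, hw⟩ := hr
      simp only [Bool.and_eq_true, decide_eq_true_eq] at hw
      refine ⟨w, ?_, hw.2⟩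
      rw [show stepA target dp m = dp.foldl (innerA target m) PySem.Set.empty from rfl, mem_stepA]
      exact Or.inr ⟨v, hv, hmem, hw.1⟩

-- ===== VERDICT (by name: the statement is the Claim_ definition above) =====
theorem can_reach_target_sum_spec : Claim_equal_can_reach_target_sum := by
  intro target numbers _hdom hpre
  unfold Spec_can_reach_target_sum
  match numbers with
  | [] => exact absurd rfl hpre
  | n0 :: rest =>
    have hB : (goB target rest 1 n0 PySem.Dict.empty).1 = reachP target n0 rest := by
      have := (goB_ok target rest rest 0 (by simp) n0 PySem.Dict.empty
        (by intro v j b h; simp [PySem.Dict.get?_empty] at h)).1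
      simpa using this
    have hfold :
        (PySem.List.pyRange 1 (((n0 :: rest).length : Nat) : Int) 1).foldl
          (fun dp i => stepA target dp (PySem.List.pyGetD (n0 :: rest) i 0))
          (PySem.Set.ofList [PySem.List.pyGetD (n0 :: rest) 0 0]) =
        rest.foldl (stepA target) (PySem.Set.ofList [n0]) := by
      rw [PySem.List.foldl_pyRange_pyGetD' (n0 :: rest) 0 (stepA target)
        (PySem.Set.ofList [PySem.List.pyGetD (n0 :: rest) 0 0]) (a := 1) (by norm_num)]
      simp [PySem.List.pyGetD]
    have hA : (PySem.Set.contains (rest.foldl (stepA target) (PySem.Set.ofList [n0])) target) =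
        reachP target n0 rest := by
      apply Bool.coe_iff_coe.mp
      rw [PySem.Set.contains_iff, foldA_reach]
      constructor
      · rintro ⟨v, hv, hr⟩
        rw [PySem.Set.mem_ofList, List.mem_singleton] at hv
        exact hv ▸ hr
      · intro h
        exact ⟨n0, by rw [PySem.Set.mem_ofList]; simp, h⟩
    have hL : can_reach_target_sum target (n0 :: rest) =
        if reachP target n0 rest = true then target else 0 := by
      unfold can_reach_target_sum
      rw [hfold, hA]
    have hR : can_reach_target_sum_alt target (n0 :: rest) =
        if reachP target n0 rest = true then target else 0 := by
      show (if (goB target rest 1 n0 PySem.Dict.empty).1 = true then target else 0) = _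
      rw [hB]
    rw [hL, hR]
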